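-- pv_equiv track=rewrite | github.com/SaikrishnaBijja/blogging-website-nodejs | views/test.py | printSeries
-- ===== SOURCE A (Python) =====
-- def printSeries(n):
--     i=2
--     sum=2
--     result=""
--     while(sum<n):
--         result+=str(sum)+","
--         sum+=i
--         i+=2
--     return result[:len(result)-1]
-- ===== SOURCE B (Python) =====
-- def printSeries(n):
--     # terms follow the closed form k*k + k + 2 for k = 0, 1, 2, ...
--     terms = []
--     k = 0
--     while k * k + k + 2 < n:
--         terms.append(str(k * k + k + 2))
--         k += 1
--     return ",".join(terms)
-- ===== Notes on version B (the rewrite author's own statement) =====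
-- stated objective: simpler
-- what changed: B computes each term directly from its index via the closed form k*k+k+2 and joins with ','.join, replacing A's two running accumulators (sum and step i) and the manual trailing-comma slice.
import Mathlib
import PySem

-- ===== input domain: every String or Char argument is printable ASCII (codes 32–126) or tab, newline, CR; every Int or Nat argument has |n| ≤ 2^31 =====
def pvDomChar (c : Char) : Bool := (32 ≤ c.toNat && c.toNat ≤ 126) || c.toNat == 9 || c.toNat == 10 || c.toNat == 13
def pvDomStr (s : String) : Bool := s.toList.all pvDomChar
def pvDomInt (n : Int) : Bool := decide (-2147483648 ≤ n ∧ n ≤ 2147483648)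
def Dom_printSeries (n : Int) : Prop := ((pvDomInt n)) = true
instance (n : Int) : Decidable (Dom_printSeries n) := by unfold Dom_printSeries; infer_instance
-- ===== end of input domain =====

-- B recomputes each term from its index by the closed form k*k+k+2 and joins with ','.join,
-- replacing A's two running accumulators (sum, i) and the manual trailing-comma slice (objective: simpler).

-- ===== PORT A =====
-- A's while loop: state (sum, i, result); the proof argument 0 < i only justifies termination.
def printSeriesLoopA (n sum i : Int) (res : List Char) (hi : 0 < i) : List Char :=
  if sum < n then
    printSeriesLoopA n (sum + i) (i + 2) (res ++ PySem.Int.toChars sum ++ [',']) (by omega)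
  else res
termination_by (n - sum).toNat
decreasing_by omega

-- result[:len(result)-1] is the slice with Int bound len-1 (negative only when result is empty)
def printSeries (n : Int) : String :=
  let res := printSeriesLoopA n 2 2 [] (by norm_num)
  String.ofList (PySem.List.slice res none (some ((res.length : Int) - 1)))

-- ===== PORT B =====
-- B's while loop: collect str(k*k+k+2) while k*k+k+2 < n; proof argument 0 ≤ k only for termination.
def printSeriesTermsB (n k : Int) (hk : 0 ≤ k) : List String :=
  if k * k + k + 2 < n then
    PySem.Int.toStr (k * k + k + 2) :: printSeriesTermsB n (k + 1) (by omega)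
  else []
termination_by (n - (k * k + k + 2)).toNat
decreasing_by
  have : k * k + k + 2 < (k + 1) * (k + 1) + (k + 1) + 2 := by nlinarith
  omega

def printSeries_alt (n : Int) : String :=
  PySem.Str.join "," (printSeriesTermsB n 0 (by norm_num))

-- ===== PRECONDITION & SPEC =====
def Spec_printSeries (n : Int) (out : String) : Prop := out = printSeries_alt n
instance (n : Int) (out : String) : Decidable (Spec_printSeries n out) := by unfold Spec_printSeries; infer_instance

-- ===== CLAIM (what is proved, stated in full; the proofs are below) =====
def Claim_equal_printSeries : Prop := ∀ (n : Int), Dom_printSeries n → Spec_printSeries n (printSeries n)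

-- ===== LEMMAS AND PROOFS =====

-- A's loop, started at the state reached after k iterations (sum = k*k+k+2, i = 2*k+2),
-- appends exactly B's remaining terms, each followed by ','.
theorem loopA_eq_termsB (n k : Int) (hk : 0 ≤ k) (res : List Char) (hi : 0 < 2 * k + 2) :
    printSeriesLoopA n (k * k + k + 2) (2 * k + 2) res hi =
      res ++ ((printSeriesTermsB n k hk).map (fun t => t.toList ++ [','])).flatten := by
  rw [printSeriesLoopA, printSeriesTermsB]
  by_cases h : k * k + k + 2 < n
  · simp only [if_pos h]
    have harg : k * k + k + 2 + (2 * k + 2) = (k + 1) * (k + 1) + (k + 1) + 2 := by ring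
    have := loopA_eq_termsB n (k + 1) (by omega)
      (res ++ PySem.Int.toChars (k * k + k + 2) ++ [','])
      (by omega)
    rw [show printSeriesLoopA n (k * k + k + 2 + (2 * k + 2)) (2 * k + 2 + 2)
          (res ++ PySem.Int.toChars (k * k + k + 2) ++ [',']) (by omega) =
        printSeriesLoopA n ((k + 1) * (k + 1) + (k + 1) + 2) (2 * (k + 1) + 2)
          (res ++ PySem.Int.toChars (k * k + k + 2) ++ [',']) (by omega) from by
      congr 1 <;> omega]
    rw [this]
    simp [PySem.Int.toList_toStr]
  · simp [if_neg h]
termination_by (n - (k * k + k + 2)).toNat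
decreasing_by
  have : k * k + k + 2 < (k + 1) * (k + 1) + (k + 1) + 2 := by nlinarith
  omega

-- dropping the trailing ',' of the concatenation gives the ','-join
theorem dropLast_flatten_eq_join (ts : List String) :
    (List.map (fun t : String => t.toList ++ [',']) ts).flatten.dropLast =
      PySem.Chars.join [','] (ts.map String.toList) := by
  induction ts with
  | nil => simp [PySem.Chars.join_nil]
  | cons x rest ih =>
    cases rest with
    | nil => simp [PySem.Chars.join_singleton]
    | cons y rest' =>
      simp only [List.map_cons, List.flatten_cons] at ih ⊢
      rw [PySem.Chars.join_cons_cons, List.dropLast_append_of_ne_nil (by simp), ih,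
        List.append_assoc]

-- the Int slice result[:len-1] is dropLast (negative bound only in the empty case)
theorem slice_len_sub_one (cs : List Char) :
    PySem.List.slice cs none (some ((cs.length : Int) - 1)) = cs.dropLast := by
  cases cs with
  | nil => simp [PySem.List.slice_to_neg_one]
  | cons x xs =>
    have h : ((x :: xs).length : Int) - 1 = (xs.length : Nat) := by simp
    rw [h, PySem.List.slice_to_natCast]
    simp [List.dropLast_eq_take]

-- ===== VERDICT (by name: the statement is the Claim_ definition above) =====
theorem printSeries_spec : Claim_equal_printSeries := by
  intro n _
  unfold Spec_printSeries printSeries printSeries_alt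
  have h0 : (0 : Int) * 0 + 0 + 2 = 2 := by norm_num
  have := loopA_eq_termsB n 0 (by norm_num) [] (by norm_num)
  simp only [h0, show (2 : Int) * 0 + 2 = 2 from by norm_num] at this
  rw [this]
  apply String.toList_inj.mp
  simp only [List.nil_append]
  rw [slice_len_sub_one, dropLast_flatten_eq_join]
  simp [PySem.Str.toList_join]
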